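-- pv_equiv track=rewrite | github.com/ssabathiel/rl-counting-agents | src/SingleAgentEnv.py | _check_squares_intersection_adjacency
-- ===== SOURCE A (Python) =====
-- def _check_squares_intersection_adjacency(picture_squares_coordinates: set,
--                                           new_square_coordinates: set) -> bool:
--     """The function checks that a newly generated square is not
--     overlapping or adjacent with the squares already present
--     in the scene.
--
--     Args:
--         picture_squares_coordinates: the coordinates describing
--             the objects already in the scene.
--         new_square_coordinates: the coordinates of the new square.
--
--     Returns:
--         A boolean value stating wether the new object is
--         overlapping with or adjacent to other objects.
--     """
--     # check intersection
--     if len(picture_squares_coordinates.intersection(new_square_coordinates)) > 0: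
--         return True
--
--     # check adjacency
--     for (x, y) in new_square_coordinates:
--         if (
--                 ((x + 1, y) in picture_squares_coordinates) or
--                 ((x, y + 1) in picture_squares_coordinates) or
--                 ((x - 1, y) in picture_squares_coordinates) or
--                 ((x, y - 1) in picture_squares_coordinates)
--         ):
--             return True
--
--     return False
-- ===== SOURCE B (Python) =====
-- def _check_squares_intersection_adjacency(picture_squares_coordinates: set,
--                                           new_square_coordinates: set) -> bool:
--     """Dilate the picture by one orthogonal step into a 'forbidden' set,
--     then the new square overlaps/adjoins iff it hits that set."""
--     forbidden = set()
--     for (x, y) in picture_squares_coordinates: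
--         forbidden.update([(x, y), (x + 1, y), (x - 1, y), (x, y + 1), (x, y - 1)])
--     return not forbidden.isdisjoint(new_square_coordinates)
-- ===== Notes on version B (the rewrite author's own statement) =====
-- stated objective: alternative
-- what changed: Instead of an intersection test plus a per-new-cell probe of four neighbor offsets into the picture set, B precomputes a one-step orthogonal dilation of the picture ('forbidden' set) and returns a single disjointness test against the new square's cells.
import Mathlib
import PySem

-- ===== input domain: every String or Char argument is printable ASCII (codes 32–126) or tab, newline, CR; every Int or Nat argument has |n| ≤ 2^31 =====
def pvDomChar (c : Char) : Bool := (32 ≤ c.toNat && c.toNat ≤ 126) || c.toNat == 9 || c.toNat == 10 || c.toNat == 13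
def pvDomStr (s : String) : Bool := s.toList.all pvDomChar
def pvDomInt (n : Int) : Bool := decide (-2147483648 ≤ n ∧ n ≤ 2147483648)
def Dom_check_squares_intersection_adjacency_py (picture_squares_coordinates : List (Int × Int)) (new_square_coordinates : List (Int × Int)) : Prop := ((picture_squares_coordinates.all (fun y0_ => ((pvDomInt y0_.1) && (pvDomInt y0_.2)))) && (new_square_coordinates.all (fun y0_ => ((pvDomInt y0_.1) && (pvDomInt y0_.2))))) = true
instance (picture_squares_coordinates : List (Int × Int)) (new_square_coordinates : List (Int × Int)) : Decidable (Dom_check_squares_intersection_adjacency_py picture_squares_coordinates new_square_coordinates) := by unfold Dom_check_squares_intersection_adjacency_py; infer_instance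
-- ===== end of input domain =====

-- ===== PORT A =====
-- Literal port of A: intersection-nonempty test, then for each new cell probe four neighbor offsets.
def check_squares_intersection_adjacency_py (picture_squares_coordinates : List (Int × Int)) (new_square_coordinates : List (Int × Int)) : Bool :=
  if PySem.Set.len (PySem.Set.inter picture_squares_coordinates new_square_coordinates) > 0 then
    true
  else
    new_square_coordinates.any (fun c =>
      PySem.Set.contains picture_squares_coordinates (c.1 + 1, c.2) ||
      PySem.Set.contains picture_squares_coordinates (c.1, c.2 + 1) ||
      PySem.Set.contains picture_squares_coordinates (c.1 - 1, c.2) ||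
      PySem.Set.contains picture_squares_coordinates (c.1, c.2 - 1))

-- ===== PORT B =====
-- Port of B: build the one-step orthogonal dilation of the picture, then one disjointness test.
def check_squares_intersection_adjacency_py_alt (picture_squares_coordinates : List (Int × Int)) (new_square_coordinates : List (Int × Int)) : Bool :=
  let forbidden : PySem.Set (Int × Int) :=
    picture_squares_coordinates.foldl
      (fun s c => PySem.Set.update s
        [(c.1, c.2), (c.1 + 1, c.2), (c.1 - 1, c.2), (c.1, c.2 + 1), (c.1, c.2 - 1)])
      PySem.Set.empty
  !(PySem.Set.isdisjoint forbidden new_square_coordinates)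

-- ===== PRECONDITION & SPEC =====
def Spec_check_squares_intersection_adjacency_py (picture_squares_coordinates : List (Int × Int)) (new_square_coordinates : List (Int × Int)) (out : Bool) : Prop := out = check_squares_intersection_adjacency_py_alt picture_squares_coordinates new_square_coordinates
instance (picture_squares_coordinates : List (Int × Int)) (new_square_coordinates : List (Int × Int)) (out : Bool) : Decidable (Spec_check_squares_intersection_adjacency_py picture_squares_coordinates new_square_coordinates out) := by unfold Spec_check_squares_intersection_adjacency_py; infer_instance

-- ===== CLAIM (what is proved, stated in full; the proofs are below) =====
def Claim_equal_check_squares_intersection_adjacency_py : Prop := ∀ (picture_squares_coordinates : List (Int × Int)) (new_square_coordinates : List (Int × Int)), Dom_check_squares_intersection_adjacency_py picture_squares_coordinates new_square_coordinates → Spec_check_squares_intersection_adjacency_py picture_squares_coordinates new_square_coordinates (check_squares_intersection_adjacency_py picture_squares_coordinates new_square_coordinates)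

-- ===== LEMMAS AND PROOFS =====

-- ===== VERDICT (by name: the statement is the Claim_ definition above) =====
-- Membership in the folded-up dilation: c is forbidden iff it is a picture cell or an orthogonal neighbor of one.
theorem mem_dilate (ps : List (Int × Int)) (acc : PySem.Set (Int × Int)) (c : Int × Int) :
    (c ∈ ps.foldl
      (fun s p => PySem.Set.update s
        [(p.1, p.2), (p.1 + 1, p.2), (p.1 - 1, p.2), (p.1, p.2 + 1), (p.1, p.2 - 1)])
      acc)
    ↔ c ∈ acc ∨ ∃ p ∈ ps,
        c = (p.1, p.2) ∨ c = (p.1 + 1, p.2) ∨ c = (p.1 - 1, p.2) ∨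
        c = (p.1, p.2 + 1) ∨ c = (p.1, p.2 - 1) := by
  induction ps generalizing acc with
  | nil => simp
  | cons p t ih =>
    simp only [List.foldl_cons, ih, PySem.Set.mem_update, List.mem_cons, List.not_mem_nil, or_false]
    aesop

theorem check_squares_intersection_adjacency_py_spec : Claim_equal_check_squares_intersection_adjacency_py := by
  intro ps ns _
  unfold Spec_check_squares_intersection_adjacency_py
  unfold check_squares_intersection_adjacency_py check_squares_intersection_adjacency_py_alt
  simp only [PySem.Set.len, PySem.Set.empty]
  rw [Bool.eq_iff_iff, Bool.not_eq_true', ← Bool.not_eq_true, PySem.Set.isdisjoint_iff]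
  push Not
  by_cases hI : 0 < (PySem.Set.inter ps ns).length
  · rw [if_pos (show ((PySem.Set.inter ps ns).length : Int) > 0 by exact_mod_cast hI)]
    simp only [true_iff]
    obtain ⟨c, hc⟩ := List.exists_mem_of_length_pos hI
    rw [PySem.Set.mem_inter] at hc
    exact ⟨c, (mem_dilate _ _ _).2 (Or.inr ⟨c, hc.1, Or.inl rfl⟩), hc.2⟩
  · have hnone : ∀ c, c ∈ ps → c ∉ ns := by
      intro c hc hcn
      exact hI (List.length_pos_of_mem ((PySem.Set.mem_inter _ _ _).2 ⟨hc, hcn⟩))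
    rw [if_neg (show ¬ ((PySem.Set.inter ps ns).length : Int) > 0 by exact_mod_cast hI)]
    simp only [List.any_eq_true, Bool.or_eq_true, PySem.Set.contains_iff]
    constructor
    · rintro ⟨c, hc, (((h | h) | h) | h)⟩
      · exact ⟨c, (mem_dilate _ _ _).2 (Or.inr ⟨_, h, Or.inr (Or.inr (Or.inl (by obtain ⟨a, b⟩ := c; simp)))⟩), hc⟩
      · exact ⟨c, (mem_dilate _ _ _).2 (Or.inr ⟨_, h, Or.inr (Or.inr (Or.inr (Or.inr (by obtain ⟨a, b⟩ := c; simp))))⟩), hc⟩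
      · exact ⟨c, (mem_dilate _ _ _).2 (Or.inr ⟨_, h, Or.inr (Or.inl (by obtain ⟨a, b⟩ := c; simp))⟩), hc⟩
      · exact ⟨c, (mem_dilate _ _ _).2 (Or.inr ⟨_, h, Or.inr (Or.inr (Or.inr (Or.inl (by obtain ⟨a, b⟩ := c; simp))))⟩), hc⟩
    · rintro ⟨f, hf, hfn⟩
      rw [mem_dilate] at hf
      rcases hf with h | ⟨p, hp, hc⟩
      · simp at h
      · obtain ⟨a, b⟩ := p
        rcases hc with rfl | rfl | rfl | rfl | rfl
        · exact absurd hfn (hnone _ hp)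
        · exact ⟨_, hfn, Or.inl (Or.inr (by simpa using hp))⟩
        · exact ⟨_, hfn, Or.inl (Or.inl (Or.inl (by simpa using hp)))⟩
        · exact ⟨_, hfn, Or.inr (by simpa using hp)⟩
        · exact ⟨_, hfn, Or.inl (Or.inl (Or.inr (by simpa using hp)))⟩
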